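-- pv_equiv track=rewrite | github.com/FatemRahimi/codewars-python | pattern.py | christmas_tree
-- ===== SOURCE A (Python) =====
-- def christmas_tree(height: int) -> str:
--     if height < 3:
--         return ''
--
--     lines = []
--     for i in range(1, height // 3 * 2 + 1, 2):
--         for j in range(i, i + 6, 2):
--             lines.append('*' * j)
--
--     line_width = len(lines[-1])
--     lines.append('###')
--     return '\r\n'.join(line.center(line_width).rstrip() for line in lines)
-- ===== SOURCE B (Python) =====
-- def christmas_tree(height: int) -> str:
--     tiers = height // 3
--     if tiers < 1:
--         return ''
--     out = []
--     row = ' ' * (tiers + 1) + '*'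
--     for k in range(3 * tiers):
--         out.append(row)
--         row = row[1:] + '**' if k % 3 < 2 else ' ' + row[:-2]
--     out.append(' ' * tiers + '###')
--     return '\r\n'.join(out)
-- ===== Notes on version B (the rewrite author's own statement) =====
-- stated objective: alternative
-- what changed: Instead of generating every row independently (nested tier/row loops of bare star strings, then center().rstrip() each against the last row's width), B keeps one current-row string and derives each next row from the previous one by slicing -- row[1:]+'**' within a tier, ' '+row[:-2] at a tier boundary -- in a single flat loop with no per-row width or centering computation.
import Mathlib
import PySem

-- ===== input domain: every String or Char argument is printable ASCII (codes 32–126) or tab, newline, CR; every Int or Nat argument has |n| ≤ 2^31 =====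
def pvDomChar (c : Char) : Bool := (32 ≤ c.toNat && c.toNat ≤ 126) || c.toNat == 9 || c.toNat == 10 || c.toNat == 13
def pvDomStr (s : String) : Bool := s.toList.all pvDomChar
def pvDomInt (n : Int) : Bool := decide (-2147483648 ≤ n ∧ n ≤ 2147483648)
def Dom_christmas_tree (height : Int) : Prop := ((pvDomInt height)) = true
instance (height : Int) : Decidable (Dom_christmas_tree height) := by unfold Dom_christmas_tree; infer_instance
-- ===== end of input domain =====

-- B builds the tree incrementally: one current-row string, each next row derived from the
-- previous by slicing (row[1:]+'**' in a tier, ' '+row[:-2] at a tier boundary) — no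
-- per-row centering; objective: alternative (same asymptotic cost).

-- ===== PORT A =====
-- hand port of CPython str.center(width): left margin = marg//2 + (marg & width & 1);
-- exact for every width and string (checked against CPython).
def pyCenter (s : String) (width : Int) : String :=
  let cs := s.toList
  if width ≤ (cs.length : Int) then s
  else
    let marg : Nat := width.toNat - cs.length
    let left : Nat := marg / 2 + (marg &&& width.toNat &&& 1)
    String.ofList (List.replicate left ' ' ++ cs ++ List.replicate (marg - left) ' ')

-- the 'lines' list A builds with its nested loops
def aLines (height : Int) : List String :=
  (PySem.List.pyRange 1 (PySem.Int.floordiv height 3 * 2 + 1) 2).foldl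
    (fun lines i =>
      (PySem.List.pyRange i (i + 6) 2).foldl
        (fun lines j => lines ++ [String.ofList (PySem.List.pyRepeat ['*'] j)]) lines)
    []

def christmas_tree (height : Int) : String :=
  if height < 3 then "" else
  PySem.Str.join "\r\n" ((aLines height ++ ["###"]).map
    (fun line => PySem.Str.rstrip (pyCenter line
      (PySem.Str.len ((PySem.List.pyGet? (aLines height) (-1)).getD "")))))

-- ===== PORT B =====
-- one loop step of Source B: append the current row, then rewrite it by slicing
def bStep (st : List (List Char) × List Char) (k : Int) : List (List Char) × List Char :=
  (st.1 ++ [st.2],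
   if PySem.Int.mod k 3 < 2 then PySem.List.slice st.2 (some 1) none ++ ['*', '*']
   else ' ' :: PySem.List.slice st.2 none (some (-2)))

def christmas_tree_alt (height : Int) : String :=
  if PySem.Int.floordiv height 3 < 1 then "" else
  PySem.Str.join "\r\n"
    ((((PySem.List.pyRange 0 (3 * PySem.Int.floordiv height 3) 1).foldl bStep
        ([], List.replicate (PySem.Int.floordiv height 3 + 1).toNat ' ' ++ ['*'])).1
      ++ [List.replicate (PySem.Int.floordiv height 3).toNat ' ' ++ ['#', '#', '#']]).map
      String.ofList)

-- ===== PRECONDITION & SPEC =====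
def Spec_christmas_tree (height : Int) (out : String) : Prop := out = christmas_tree_alt height
instance (height : Int) (out : String) : Decidable (Spec_christmas_tree height out) := by unfold Spec_christmas_tree; infer_instance

-- ===== CLAIM (what is proved, stated in full; the proofs are below) =====
def Claim_equal_christmas_tree : Prop := ∀ (height : Int), Dom_christmas_tree height → Spec_christmas_tree height (christmas_tree height)

-- ===== LEMMAS AND PROOFS =====

-- the star count of the raw row A appends at flat index m
def starCount (m : Nat) : Nat := 2 * (m / 3) + 2 * (m % 3) + 1

def rawRow (m : Nat) : String := String.ofList (List.replicate (starCount m) '*')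

-- the m-th finished row of the tree of n tiers, as B maintains it
def rowChars (n m : Nat) : List Char :=
  List.replicate (n + 1 - m / 3 - m % 3) ' ' ++ List.replicate (starCount m) '*'

theorem and_one_of_even (d w : Nat) : 2 * d &&& w &&& 1 = 0 := by
  rw [Nat.and_assoc]
  rcases Nat.mod_two_eq_zero_or_one w with h | h
  · have hw : w &&& 1 = 0 := by rw [Nat.and_one_is_mod, h]
    rw [hw, Nat.and_zero]
  · have hw : w &&& 1 = 1 := by rw [Nat.and_one_is_mod, h]
    rw [hw, Nat.and_one_is_mod, Nat.mul_mod_right]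

theorem rstrip_pad (l c r : Nat) (ch : Char) (hc : 0 < c)
    (h : PySem.Chars.isspace ch = false) :
    PySem.Chars.rstrip (List.replicate l ' ' ++ List.replicate c ch ++ List.replicate r ' ')
      = List.replicate l ' ' ++ List.replicate c ch := by
  obtain ⟨c', rfl⟩ : ∃ c', c = c' + 1 := ⟨c - 1, by omega⟩
  unfold PySem.Chars.rstrip
  rw [List.reverse_append, List.reverse_append]
  simp only [List.reverse_replicate]
  rw [List.dropWhile_append, List.dropWhile_replicate]
  have hsp : PySem.Chars.isspace ' ' = true := by decide
  rw [List.replicate_succ]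
  simp [hsp, h, List.reverse_append]
  rw [← List.replicate_succ', ← List.replicate_succ]

-- rstrip(center(replicate c ch, w)) = arithmetic left padding, for c ≤ w of equal parity
theorem center_rstrip_eq (c w : Nat) (ch : Char) (hc : 0 < c) (hcw : c ≤ w)
    (hpar : (w - c) % 2 = 0) (hsp : PySem.Chars.isspace ch = false) :
    PySem.Str.rstrip (pyCenter (String.ofList (List.replicate c ch)) (w : Int))
      = String.ofList (List.replicate ((w - c) / 2) ' ' ++ List.replicate c ch) := by
  have htl : (String.ofList (List.replicate c ch)).toList = List.replicate c ch :=
    String.toList_ofList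
  rcases eq_or_lt_of_le hcw with heq | hlt
  · subst heq
    unfold pyCenter
    simp only [htl, List.length_replicate, le_refl, if_pos]
    rw [PySem.Str.rstrip, htl]
    rw [show c - c = 0 by omega]
    have := congrArg String.ofList (rstrip_pad 0 c 0 ch hc hsp)
    simpa using this
  · unfold pyCenter
    simp only [htl, List.length_replicate]
    rw [if_neg (by exact_mod_cast not_le.mpr hlt)]
    obtain ⟨d, hd⟩ : ∃ d, w - c = 2 * d := ⟨(w - c) / 2, by omega⟩
    have hmarg : (w : Int).toNat - c = 2 * d := by omega
    rw [PySem.Str.rstrip]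
    rw [hmarg, String.toList_ofList, rstrip_pad _ _ _ _ hc hsp, and_one_of_even]
    have : 2 * d / 2 + 0 = (w - c) / 2 := by omega
    rw [this]

theorem pyRangeOdd (n : Nat) :
    PySem.List.pyRange 1 ((n : Int) * 2 + 1) 2 =
      (List.range n).map (fun (k : Nat) => 1 + 2 * (k : Int)) := by
  rw [PySem.List.pyRange_of_pos _ _ (by omega)]
  by_cases h : (1 : Int) < (n : Int) * 2 + 1
  · rw [if_pos h]
    have hc : (((n : Int) * 2 + 1 - 1 + 2 - 1) / 2).toNat = n := by omega
    rw [hc]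
  · rw [if_neg h]
    have : n = 0 := by omega
    simp [this]

theorem pyRangeInner (i : Int) : PySem.List.pyRange i (i + 6) 2 = [i, i + 2, i + 4] := by
  rw [PySem.List.pyRange_of_pos _ _ (by omega), if_pos (by omega)]
  have h3 : ((i + 6 - i + 2 - 1) / 2).toNat = 3 := by omega
  rw [h3]
  norm_num [List.range_succ]

theorem hrow_aux (j : Int) (m : Nat) (hj : j.toNat = starCount m) :
    String.ofList (PySem.List.pyRepeat ['*'] j) = rawRow m := by
  unfold rawRow
  rw [PySem.List.pyRepeat_singleton, hj]

theorem aLoop (n : Nat) :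
    ((List.range n).map (fun (k : Nat) => 1 + 2 * (k : Int))).foldl
      (fun lines i =>
        (PySem.List.pyRange i (i + 6) 2).foldl
          (fun lines j => lines ++ [String.ofList (PySem.List.pyRepeat ['*'] j)]) lines)
      []
    = (List.range (3 * n)).map rawRow := by
  induction n with
  | zero => simp
  | succ n ih =>
      rw [List.range_succ, List.map_append, List.foldl_append, ih]
      simp only [List.map_cons, List.map_nil, List.foldl_cons, List.foldl_nil]
      rw [pyRangeInner]
      simp only [List.foldl_cons, List.foldl_nil]
      rw [hrow_aux (1 + 2 * (n : Int)) (3 * n) (by unfold starCount; omega),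
          hrow_aux (1 + 2 * (n : Int) + 2) (3 * n + 1) (by unfold starCount; omega),
          hrow_aux (1 + 2 * (n : Int) + 4) (3 * n + 2) (by unfold starCount; omega)]
      rw [show 3 * (n + 1) = 3 * n + 1 + 1 + 1 by omega,
          List.range_succ, List.range_succ, List.range_succ]
      simp

theorem aLines_eq (height : Int) (n : Nat)
    (hn : (n : Int) = PySem.Int.floordiv height 3) :
    aLines height = (List.range (3 * n)).map rawRow := by
  unfold aLines
  rw [← hn, pyRangeOdd, aLoop]

theorem last_rawRow (n : Nat) (h : 1 ≤ n) :
    (PySem.List.pyGet? ((List.range (3 * n)).map rawRow) (-1)).getD "" = rawRow (3 * n - 1) := by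
  unfold PySem.List.pyGet? PySem.List.pyIdx?
  simp only [List.length_map, List.length_range]
  rw [if_neg (by omega), if_pos (by omega)]
  have h1 : 3 * n - (-(-1 : Int)).toNat = 3 * n - 1 := by omega
  rw [h1]
  simp only [Option.bind_some, List.getElem?_map]
  rw [List.getElem?_range (by omega)]
  simp

theorem len_rawRow (n : Nat) (h : 1 ≤ n) :
    PySem.Str.len (rawRow (3 * n - 1)) = ((2 * n + 3 : Nat) : Int) := by
  unfold rawRow PySem.Str.len
  rw [String.toList_ofList, List.length_replicate]
  unfold starCount
  congr 1
  omega

-- A's row m, centered to the tree's width and rstripped, is the finished row rowChars n m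
theorem row_eq (n m : Nat) (hm : m < 3 * n) :
    PySem.Str.rstrip (pyCenter (rawRow m) ((2 * n + 3 : Nat) : Int))
      = String.ofList (rowChars n m) := by
  have hle : starCount m ≤ 2 * n + 3 := by unfold starCount; omega
  have hpar : (2 * n + 3 - starCount m) % 2 = 0 := by unfold starCount; omega
  unfold rawRow rowChars
  rw [center_rstrip_eq (starCount m) (2 * n + 3) '*' (by unfold starCount; omega) hle hpar
    (by decide)]
  have : (2 * n + 3 - starCount m) / 2 = n + 1 - m / 3 - m % 3 := by
    unfold starCount; omega
  rw [this]

theorem trunk_eq (n : Nat) (hn1 : 1 ≤ n) :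
    PySem.Str.rstrip (pyCenter "###" ((2 * n + 3 : Nat) : Int))
      = String.ofList (List.replicate n ' ' ++ ['#', '#', '#']) := by
  have h3 : "###" = String.ofList (List.replicate 3 '#') := rfl
  rw [h3, center_rstrip_eq 3 (2 * n + 3) '#' (by omega) (by omega) (by omega) (by decide)]
  have h1 : (2 * n + 3 - 3) / 2 = n := by omega
  rw [h1]
  rfl

-- B's slicing step turns the finished row m into the finished row m+1
theorem bStep_row (n m : Nat) (hm : m < 3 * n) :
    (if PySem.Int.mod (m : Int) 3 < 2
     then PySem.List.slice (rowChars n m) (some 1) none ++ ['*', '*']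
     else ' ' :: PySem.List.slice (rowChars n m) none (some (-2)))
      = rowChars n (m + 1) := by
  have hmod : PySem.Int.mod (m : Int) 3 = ((m % 3 : Nat) : Int) :=
    PySem.Int.mod_natCast m 3
  by_cases h2 : m % 3 < 2
  · rw [if_pos (by rw [hmod]; exact_mod_cast h2)]
    unfold rowChars
    rw [PySem.List.slice_from_one]
    have hp : n + 1 - m / 3 - m % 3 = (n - m / 3 - m % 3) + 1 := by omega
    rw [hp, List.replicate_succ]
    simp only [List.cons_append, List.tail_cons]
    rw [List.append_assoc,
        show ['*', '*'] = List.replicate 2 '*' from rfl, ← List.replicate_add]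
    have hc : starCount m + 2 = starCount (m + 1) := by
      unfold starCount; omega
    have hp' : n - m / 3 - m % 3 = n + 1 - (m + 1) / 3 - (m + 1) % 3 := by omega
    rw [hc, hp']
  · rw [if_neg (by rw [hmod]; exact_mod_cast h2)]
    unfold rowChars
    rw [PySem.List.slice_to_neg_ofNat _ 2 (by omega)]
    have hlen : (List.replicate (n + 1 - m / 3 - m % 3) ' '
        ++ List.replicate (starCount m) '*').length
        = (n + 1 - m / 3 - m % 3) + starCount m := by
      simp
    rw [hlen]
    have hc2 : 2 ≤ starCount m := by unfold starCount; omega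
    rw [show (n + 1 - m / 3 - m % 3) + starCount m - 2
          = (List.replicate (n + 1 - m / 3 - m % 3) ' ').length + (starCount m - 2) by
        simp; omega,
      List.take_append, List.take_replicate]
    have h3 : m % 3 = 2 := by omega
    have hp : (n + 1 - (m + 1) / 3 - (m + 1) % 3) = (n + 1 - m / 3 - m % 3) + 1 := by omega
    have hc : starCount (m + 1) = starCount m - 2 := by unfold starCount; omega
    rw [hp, hc, List.replicate_succ]
    simp

-- B's loop invariant: after m steps, out = the first m finished rows and row = row m
theorem bLoop (n m : Nat) (hm : m ≤ 3 * n) :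
    ((List.range m).map (Nat.cast : Nat → Int)).foldl bStep ([], rowChars n 0)
      = ((List.range m).map (rowChars n), rowChars n m) := by
  induction m with
  | zero => simp
  | succ m ih =>
      have hm' : m ≤ 3 * n := by omega
      rw [List.range_succ, List.map_append, List.foldl_append, ih hm',
          List.map_append]
      simp only [List.map_cons, List.map_nil, List.foldl_cons, List.foldl_nil]
      unfold bStep
      simp only []
      rw [bStep_row n m (by omega)]

-- ===== VERDICT (by name: the statement is the Claim_ definition above) =====
set_option maxHeartbeats 1000000 in
theorem christmas_tree_spec : Claim_equal_christmas_tree := by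
  intro height _
  unfold Spec_christmas_tree christmas_tree christmas_tree_alt
  by_cases h3 : height < 3
  · have ht : PySem.Int.floordiv height 3 < 1 := by
      rw [PySem.Int.floordiv_lt_iff_lt_mul (by omega)]; omega
    rw [if_pos h3, if_pos ht]
  · have hT : 1 ≤ PySem.Int.floordiv height 3 := by
      rw [PySem.Int.le_floordiv_iff_mul_le (by omega)]; omega
    rw [if_neg h3, if_neg (by omega)]
    obtain ⟨n, hn⟩ : ∃ n : Nat, (n : Int) = PySem.Int.floordiv height 3 :=
      ⟨(PySem.Int.floordiv height 3).toNat, by omega⟩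
    have hn1 : 1 ≤ n := by omega
    rw [aLines_eq height n hn, ← hn, last_rawRow n hn1, len_rawRow n hn1]
    have hrange : PySem.List.pyRange 0 (3 * (n : Int)) 1
        = (List.range (3 * n)).map (Nat.cast : Nat → Int) := by
      rw [show (3 * (n : Int)) = ((3 * n : Nat) : Int) by push_cast; ring,
        PySem.List.pyRange_zero_natCast]
    have hinit : List.replicate ((n : Int) + 1).toNat ' ' ++ ['*'] = rowChars n 0 := by
      unfold rowChars starCount
      norm_num
    rw [hrange, hinit, bLoop n (3 * n) le_rfl]
    have htrunkN : List.replicate ((n : Int)).toNat ' ' ++ ['#', '#', '#']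
        = List.replicate n ' ' ++ ['#', '#', '#'] := by
      rw [Int.toNat_natCast]
    rw [htrunkN]
    rw [List.map_append, List.map_map, List.map_append, List.map_map]
    simp only [List.map_cons, List.map_nil]
    rw [trunk_eq n hn1]
    apply congrArg
    apply congrArg (· ++ _)
    exact List.map_congr_left (fun m hmem => by
      simp only [Function.comp]
      exact row_eq n m (List.mem_range.mp hmem))
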